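-- pv_equiv track=rewrite | github.com/gaspardpetit/senko | senko/vad_local_pyannote/model.py | multi_conv_receptive_field_size
-- ===== SOURCE A (Python) =====
-- def conv1d_receptive_field_size(num_frames=1, kernel_size=5, stride=1, padding=0, dilation=1):
--     effective_kernel_size = 1 + (kernel_size - 1) * dilation
--     return effective_kernel_size + (num_frames - 1) * stride - 2 * padding
--
-- def multi_conv_receptive_field_size(
--     num_frames: int,
--     kernel_size: list[int],
--     stride: list[int],
--     padding: list[int],
--     dilation: list[int],
-- ) -> int:
--     receptive_field_size = num_frames
--     for k, s, p, d in reversed(list(zip(kernel_size, stride, padding, dilation))):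
--         receptive_field_size = conv1d_receptive_field_size(
--             num_frames=receptive_field_size,
--             kernel_size=k,
--             stride=s,
--             padding=p,
--             dilation=d,
--         )
--     return receptive_field_size
-- ===== SOURCE B (Python) =====
-- def multi_conv_receptive_field_size(
--     num_frames: int,
--     kernel_size: list[int],
--     stride: list[int],
--     padding: list[int],
--     dilation: list[int],
-- ) -> int:
--     # Closed form of the folded affine recurrence, evaluated in ONE FORWARD pass:
--     # result = num_frames * prod(strides) + sum_i b_i * prod(strides of earlier layers),
--     # where b_i = 1 + (k_i - 1)*d_i - s_i - 2*p_i.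
--     prod = 1
--     acc = 0
--     for k, s, p, d in zip(kernel_size, stride, padding, dilation):
--         acc += (1 + (k - 1) * d - s - 2 * p) * prod
--         prod *= s
--     return num_frames * prod + acc
-- ===== Notes on version B (the rewrite author's own statement) =====
-- stated objective: alternative
-- what changed: Replaces the reversed-order affine fold (applying conv1d_receptive_field_size layer by layer from last to first) by the expanded closed form: a single forward pass maintaining a running stride product and an accumulated offset, returning num_frames*prod + acc.
import Mathlib
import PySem

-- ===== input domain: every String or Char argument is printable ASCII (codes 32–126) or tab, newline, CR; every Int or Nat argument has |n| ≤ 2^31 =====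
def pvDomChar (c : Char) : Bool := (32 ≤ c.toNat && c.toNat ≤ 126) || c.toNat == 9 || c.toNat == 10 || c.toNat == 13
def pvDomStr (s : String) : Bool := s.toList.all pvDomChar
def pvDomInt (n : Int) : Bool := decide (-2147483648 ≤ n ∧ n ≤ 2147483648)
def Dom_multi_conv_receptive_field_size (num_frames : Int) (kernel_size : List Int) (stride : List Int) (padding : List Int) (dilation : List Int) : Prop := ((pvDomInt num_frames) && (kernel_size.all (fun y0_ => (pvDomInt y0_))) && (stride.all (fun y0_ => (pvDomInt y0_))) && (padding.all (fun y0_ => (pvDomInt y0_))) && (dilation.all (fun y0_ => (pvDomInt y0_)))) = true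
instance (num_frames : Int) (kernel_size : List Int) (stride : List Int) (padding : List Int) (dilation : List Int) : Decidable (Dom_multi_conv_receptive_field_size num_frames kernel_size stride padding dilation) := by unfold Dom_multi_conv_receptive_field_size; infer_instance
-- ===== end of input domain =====

-- B replaces A's reversed-order affine fold by its expanded closed form evaluated in one forward pass (alternative decomposition, same cost).
-- ===== PORT A =====
def conv1d_receptive_field_size (num_frames kernel_size stride padding dilation : Int) : Int :=
  let effective_kernel_size := 1 + (kernel_size - 1) * dilation
  effective_kernel_size + (num_frames - 1) * stride - 2 * padding

def multi_conv_receptive_field_size (num_frames : Int) (kernel_size : List Int) (stride : List Int) (padding : List Int) (dilation : List Int) : Int :=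
  ((kernel_size.zip (stride.zip (padding.zip dilation))).reverse).foldl
    (fun receptive_field_size x =>
      conv1d_receptive_field_size receptive_field_size x.1 x.2.1 x.2.2.1 x.2.2.2)
    num_frames

-- ===== PORT B =====
def multi_conv_receptive_field_size_alt (num_frames : Int) (kernel_size : List Int) (stride : List Int) (padding : List Int) (dilation : List Int) : Int :=
  let st := (kernel_size.zip (stride.zip (padding.zip dilation))).foldl
    (fun (pa : Int × Int) x =>
      (pa.1 * x.2.1, pa.2 + (1 + (x.1 - 1) * x.2.2.2 - x.2.1 - 2 * x.2.2.1) * pa.1))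
    (1, 0)
  num_frames * st.1 + st.2

-- ===== PRECONDITION & SPEC =====
def Spec_multi_conv_receptive_field_size (num_frames : Int) (kernel_size : List Int) (stride : List Int) (padding : List Int) (dilation : List Int) (out : Int) : Prop := out = multi_conv_receptive_field_size_alt num_frames kernel_size stride padding dilation
instance (num_frames : Int) (kernel_size : List Int) (stride : List Int) (padding : List Int) (dilation : List Int) (out : Int) : Decidable (Spec_multi_conv_receptive_field_size num_frames kernel_size stride padding dilation out) := by unfold Spec_multi_conv_receptive_field_size; infer_instance

-- ===== CLAIM (what is proved, stated in full; the proofs are below) =====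
def Claim_equal_multi_conv_receptive_field_size : Prop := ∀ (num_frames : Int) (kernel_size : List Int) (stride : List Int) (padding : List Int) (dilation : List Int), Dom_multi_conv_receptive_field_size num_frames kernel_size stride padding dilation → Spec_multi_conv_receptive_field_size num_frames kernel_size stride padding dilation (multi_conv_receptive_field_size num_frames kernel_size stride padding dilation)

-- ===== LEMMAS AND PROOFS =====
-- Invariant: B's forward pair-fold, started at any (P, acc), computes acc + P * (A's foldr).
lemma pv_pair_fold_inv (L : List (Int × Int × Int × Int)) :
    ∀ (n P acc : Int),
      n * (L.foldl
            (fun (pa : Int × Int) x =>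
              (pa.1 * x.2.1, pa.2 + (1 + (x.1 - 1) * x.2.2.2 - x.2.1 - 2 * x.2.2.1) * pa.1))
            (P, acc)).1
        + (L.foldl
            (fun (pa : Int × Int) x =>
              (pa.1 * x.2.1, pa.2 + (1 + (x.1 - 1) * x.2.2.2 - x.2.1 - 2 * x.2.2.1) * pa.1))
            (P, acc)).2
      = acc + P * (L.foldr
            (fun x r => conv1d_receptive_field_size r x.1 x.2.1 x.2.2.1 x.2.2.2) n) := by
  induction L with
  | nil => intro n P acc; simp [List.foldl, List.foldr]; ring
  | cons x t ih =>
    intro n P acc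
    simp only [List.foldl_cons, List.foldr_cons]
    rw [ih]
    simp [conv1d_receptive_field_size]
    ring

-- ===== VERDICT (by name: the statement is the Claim_ definition above) =====
theorem multi_conv_receptive_field_size_spec : Claim_equal_multi_conv_receptive_field_size := by
  intro n ks ss ps ds _
  unfold Spec_multi_conv_receptive_field_size
  unfold multi_conv_receptive_field_size multi_conv_receptive_field_size_alt
  rw [List.foldl_reverse]
  rw [pv_pair_fold_inv]
  ring
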